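-- pv_equiv track=rewrite | github.com/Ahmedtariq08/omsa-CSE6040 | Practice/seflAssessmentModule0.py | find_guidelines
-- ===== SOURCE A (Python) =====
-- def find_guidelines(exam_guidelines):
--     output = {}
--     for permission in exam_guidelines:
--         permissionCategories = exam_guidelines[permission]
--         for category in permissionCategories:
--             arr = permissionCategories[category]
--             newArr = list(map(lambda value: {value: permission}, arr))
--             if category in output:
--                 output[category] = output[category] + newArr
--             else:
--                 output[category] = newArr
--
--     return output
-- ===== SOURCE B (Python) =====
-- def find_guidelines(exam_guidelines):
--     # Different algorithm: flatten to (category, mapped-values) pairs, then group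
--     # by distinct category in first-occurrence order with a per-category gather pass.
--     pairs = [(category, [{value: permission} for value in arr])
--              for permission, categories in exam_guidelines.items()
--              for category, arr in categories.items()]
--     order = []
--     seen = set()
--     for category, _ in pairs:
--         if category not in seen:
--             seen.add(category)
--             order.append(category)
--     return {category: [m for c, ms in pairs if c == category for m in ms]
--             for category in order}
-- ===== Notes on version B (the rewrite author's own statement) =====
-- stated objective: alternative
-- what changed: Instead of A's single incremental pass that grows per-category buckets inside a dict, B first flattens the nested dict into (category, mapped-values) pairs, computes the distinct categories in first-occurrence order, and then builds each category's list by a separate gather pass over the flattened pairs.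
import Mathlib
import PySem

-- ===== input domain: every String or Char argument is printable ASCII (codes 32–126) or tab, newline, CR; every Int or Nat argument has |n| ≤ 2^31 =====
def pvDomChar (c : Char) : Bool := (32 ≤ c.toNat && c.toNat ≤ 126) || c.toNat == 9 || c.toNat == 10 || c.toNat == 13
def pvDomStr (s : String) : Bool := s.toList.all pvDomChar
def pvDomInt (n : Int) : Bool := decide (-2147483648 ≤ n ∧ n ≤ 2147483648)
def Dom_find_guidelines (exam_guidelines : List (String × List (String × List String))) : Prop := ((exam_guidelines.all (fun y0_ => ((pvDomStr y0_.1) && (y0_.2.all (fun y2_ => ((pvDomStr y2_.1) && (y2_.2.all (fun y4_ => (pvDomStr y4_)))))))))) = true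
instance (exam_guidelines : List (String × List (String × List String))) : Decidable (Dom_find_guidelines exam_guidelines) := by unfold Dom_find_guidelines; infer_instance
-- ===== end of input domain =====

-- B replaces A's incremental dict of growing buckets by a staged flatten /
-- key-discovery / per-category gather pipeline (objective: alternative).

-- ===== PORT A =====
def find_guidelines (exam_guidelines : List (String × List (String × List String))) : List (String × List (List (String × String))) :=
  (exam_guidelines.foldl
    (fun (output : PySem.Dict String (List (List (String × String)))) permEntry =>
      let permission := permEntry.1
      let permissionCategories := permEntry.2
      permissionCategories.foldl
        (fun output catEntry =>
          let category := catEntry.1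
          let arr := catEntry.2
          let newArr := arr.map (fun value => [(value, permission)])
          if output.contains category then
            -- output[category]: exact via getD since the branch guarantees the key is present
            output.insert category (output.getD category [] ++ newArr)
          else
            output.insert category newArr)
        output)
    PySem.Dict.empty).items

-- ===== PORT B =====
def find_guidelines_alt (exam_guidelines : List (String × List (String × List String))) : List (String × List (List (String × String))) :=
  -- pass 1: flatten the nested structure into (category, [{value: permission}…]) pairs
  let pairs := exam_guidelines.flatMap
    (fun pe => pe.2.map (fun ce => (ce.1, ce.2.map (fun value => [(value, pe.1)]))))
  -- pass 2: distinct categories in first-occurrence order (order list + seen set)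
  let order := (pairs.foldl
    (fun (st : List String × PySem.Set String) p =>
      if PySem.Set.contains st.2 p.1 then st else (st.1 ++ [p.1], PySem.Set.add st.2 p.1))
    ([], PySem.Set.empty)).1
  -- pass 3: per category, gather its mappings by scanning the flattened pairs
  order.map (fun category =>
    (category, pairs.flatMap (fun q => if q.1 == category then q.2 else [])))

-- ===== PRECONDITION & SPEC =====
def Spec_find_guidelines (exam_guidelines : List (String × List (String × List String))) (out : List (String × List (List (String × String)))) : Prop := out = find_guidelines_alt exam_guidelines
instance (exam_guidelines : List (String × List (String × List String))) (out : List (String × List (List (String × String)))) : Decidable (Spec_find_guidelines exam_guidelines out) := by unfold Spec_find_guidelines; infer_instance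

-- ===== CLAIM (what is proved, stated in full; the proofs are below) =====
def Claim_equal_find_guidelines : Prop := ∀ (exam_guidelines : List (String × List (String × List String))), Dom_find_guidelines exam_guidelines → Spec_find_guidelines exam_guidelines (find_guidelines exam_guidelines)

-- ===== LEMMAS AND PROOFS =====

-- the "append to the bucket" step, over the flattened pair list
def pvStep (d : PySem.Dict String (List (List (String × String)))) (p : String × List (List (String × String))) : PySem.Dict String (List (List (String × String))) :=
  d.insert p.1 (d.getD p.1 [] ++ p.2)

-- the per-category gather of B
def pvGather (l : List (String × List (List (String × String)))) (c : String) : List (List (String × String)) :=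
  l.flatMap (fun q => if q.1 == c then q.2 else [])

theorem pvGather_append_singleton (l : List (String × List (List (String × String)))) (p : String × List (List (String × String))) (c : String) :
    pvGather (l ++ [p]) c = pvGather l c ++ (if p.1 == c then p.2 else []) := by
  simp [pvGather]

theorem pvGather_of_not_mem (l : List (String × List (List (String × String)))) (c : String)
    (h : c ∉ l.map (·.1)) : pvGather l c = [] := by
  simp only [pvGather, List.flatMap_eq_nil_iff]
  intro q hq
  have : q.1 ≠ c := fun hc => h (hc ▸ List.mem_map_of_mem hq)
  simp [this]

-- A's two branches collapse into pvStep: when the key is absent getD gives [] and [] ++ newArr = newArr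
theorem pvA_branch_eq (d : PySem.Dict String (List (List (String × String)))) (c : String)
    (xs : List (List (String × String))) :
    (if d.contains c then d.insert c (d.getD c [] ++ xs) else d.insert c xs) = pvStep d (c, xs) := by
  by_cases hc : d.contains c = true
  · simp [pvStep, hc]
  · simp only [Bool.not_eq_true] at hc
    simp [pvStep, hc, PySem.Dict.getD_of_not_contains d [] hc]

-- B's order loop keeps its two accumulators (order list, seen set) equal
theorem pvOrder_fold (l : List (String × List (List (String × String)))) (s : PySem.Set String) :
    l.foldl
      (fun (st : List String × PySem.Set String) p =>
        if PySem.Set.contains st.2 p.1 then st else (st.1 ++ [p.1], PySem.Set.add st.2 p.1))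
      (s, s)
    = (PySem.Set.update s (l.map (·.1)), PySem.Set.update s (l.map (·.1))) := by
  induction l generalizing s with
  | nil => simp [PySem.Set.update]
  | cons p rest ih =>
    simp only [List.foldl_cons, List.map_cons, PySem.Set.update_cons]
    by_cases hm : p.1 ∈ s
    · have hco : PySem.Set.contains s p.1 = true := by simp [hm]
      rw [if_pos hco, PySem.Set.add_of_mem hm]
      exact ih s
    · have hco : ¬ (PySem.Set.contains s p.1 = true) := by simp [hm]
      rw [if_neg hco, PySem.Set.add_of_not_mem hm]
      exact ih (s ++ [p.1])

-- the heart: the incremental dict fold, read off through .items, IS ofList-of-keys mapped to gathers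
theorem pvMain (l : List (String × List (List (String × String)))) :
    (l.foldl pvStep PySem.Dict.empty).items
      = (PySem.Set.ofList (l.map (·.1))).map (fun c => (c, pvGather l c)) := by
  induction l using List.reverseRecOn with
  | nil => rfl
  | append_singleton l p ih =>
    have hkeys : (l.foldl pvStep PySem.Dict.empty).keys = PySem.Set.ofList (l.map (·.1)) := by
      simp only [PySem.Dict.keys, ih, List.map_map]
      have hid : ((fun (x : String × List (List (String × String))) => x.1) ∘ fun c => (c, pvGather l c)) = id := rfl
      rw [hid, List.map_id]
    have hnd : (l.foldl pvStep PySem.Dict.empty).keys.Nodup := by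
      rw [hkeys]; exact PySem.Set.nodup_ofList _
    rw [List.foldl_append, List.foldl_cons, List.foldl_nil]
    rw [List.map_append, List.map_cons, List.map_nil, PySem.Set.ofList_append_singleton]
    by_cases hm : p.1 ∈ PySem.Set.ofList (l.map (·.1))
    · -- existing category: in-place replacement of its bucket
      have hcont : (l.foldl pvStep PySem.Dict.empty).contains p.1 = true := by
        rw [PySem.Dict.contains_eq_decide_mem_keys, hkeys]; simpa using hm
      have hmemitems : (p.1, pvGather l p.1) ∈ (l.foldl pvStep PySem.Dict.empty).items := by
        rw [ih]; exact List.mem_map_of_mem hm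
      have hgetD : (l.foldl pvStep PySem.Dict.empty).getD p.1 [] = pvGather l p.1 :=
        PySem.Dict.getD_of_mem_items _ hmemitems hnd []
      rw [pvStep, PySem.Dict.items_insert_of_contains _ _ hcont, hgetD,
        PySem.Set.add_of_mem hm, ih, List.map_map]
      apply List.map_congr_left
      intro c hc
      by_cases hcp : c = p.1
      · subst hcp; simp [pvGather_append_singleton]
      · have h2 : (p.1 == c) = false := by simp [Ne.symm hcp]
        simp [pvGather_append_singleton, h2, hcp]
    · -- new category: appended at the end
      have hcont : (l.foldl pvStep PySem.Dict.empty).contains p.1 = false := by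
        rw [PySem.Dict.contains_eq_decide_mem_keys, hkeys]; simpa using hm
      have hgetD : (l.foldl pvStep PySem.Dict.empty).getD p.1 [] = [] :=
        PySem.Dict.getD_of_not_contains _ [] hcont
      have hnotmem : p.1 ∉ l.map (·.1) := fun h => hm ((PySem.Set.mem_ofList _ _).mpr h)
      rw [pvStep, PySem.Dict.items_insert_of_not_contains _ _ hcont, hgetD,
        PySem.Set.add_of_not_mem hm, ih, List.map_append]
      congr 1
      · apply List.map_congr_left
        intro c hc
        have hne : (p.1 == c) = false := by
          have : p.1 ≠ c := fun h => hm (h ▸ hc)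
          simp [this]
        simp [pvGather_append_singleton, hne]
      · simp [pvGather_append_singleton, pvGather_of_not_mem l p.1 hnotmem]

-- the flattened pair list of B, named for the final assembly
def pvPairs (eg : List (String × List (String × List String))) : List (String × List (List (String × String))) :=
  eg.flatMap (fun pe => pe.2.map (fun ce => (ce.1, ce.2.map (fun value => [(value, pe.1)]))))

-- ===== VERDICT (by name: the statement is the Claim_ definition above) =====
theorem find_guidelines_spec : Claim_equal_find_guidelines := by
  intro eg _
  unfold Spec_find_guidelines
  -- B, with its let-bound stages named
  have hB : find_guidelines_alt eg
      = ((pvPairs eg).foldl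
          (fun (st : List String × PySem.Set String) p =>
            if PySem.Set.contains st.2 p.1 then st else (st.1 ++ [p.1], PySem.Set.add st.2 p.1))
          ([], PySem.Set.empty)).1.map
          (fun category => (category, (pvPairs eg).flatMap (fun q => if q.1 == category then q.2 else []))) := rfl
  -- A's nested loop is pvStep folded over that same flattened pair list
  have hA : find_guidelines eg = ((pvPairs eg).foldl pvStep PySem.Dict.empty).items := by
    unfold find_guidelines pvPairs
    rw [List.foldl_flatMap]
    congr 1
    apply PySem.List.foldl_congr_mem eg _ _ _
    intro d pe _
    rw [List.foldl_map]
    apply PySem.List.foldl_congr_mem pe.2 _ _ _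
    intro d' ce _
    exact pvA_branch_eq d' ce.1 (ce.2.map (fun value => [(value, pe.1)]))
  rw [hA, hB, pvMain]
  have h0 : (([], PySem.Set.empty) : List String × PySem.Set String) = (PySem.Set.empty, PySem.Set.empty) := rfl
  rw [h0, pvOrder_fold]
  rfl
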